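-- pv_equiv track=rewrite | github.com/t4mber/Spellcraft | scripts/chaos-monkey-subtlety.py | inject_level3_bit_growth
-- ===== SOURCE A (Python) =====
-- from typing import List, Dict, Tuple
--
-- def inject_level3_bit_growth(content: str) -> Tuple[str, Dict]:
--     """Level 3: Silent bit-width growth without overflow protection"""
--     lines = content.split('\n')
--
--     # Find a signal with WIDTH-1 downto 0
--     for i, line in enumerate(lines):
--         if 'signal' in line and 'downto 0' in line and 'WIDTH - 1' in line:
--             # Add a signal that will grow without protection
--             marker = [
--                 "  -- CHAOS-MONKEY: level3-bitgrowth",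
--                 "  -- SUBTLETY: 3 (Subtle)",
--                 "  -- VIOLATION: Arithmetic operation without overflow protection",
--                 "  signal s_accumulator : unsigned(G_WIDTH - 1 downto 0); -- Will overflow!"
--             ]
--             lines.insert(i+1, '\n'.join(marker))
--
--             # Find process and add accumulation without bounds check
--             for j in range(i+2, len(lines)):
--                 if 'if rising_edge' in lines[j]:
--                     lines.insert(j+1, "      -- SUBTLE BUG: Accumulator can overflow silently")
--                     lines.insert(j+2, "      s_accumulator <= s_accumulator + 1;")
--                     break
--
--             return '\n'.join(lines), {
--                 "id": "level3-bitgrowth",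
--                 "subtlety": 3,
--                 "category": "Functional Errors",
--                 "type": "Silent Overflow",
--                 "severity": "subtle",
--                 "line": i + 2,
--                 "description": "Counter/accumulator will silently overflow without saturation",
--                 "detection_difficulty": "subtle",
--                 "expected_detection": {
--                     "should_detect": True,
--                     "detection_method": "arithmetic_bounds_checker",
--                     "confidence": "medium"
--                 }
--             }
--     return content, None
-- ===== SOURCE B (Python) =====
-- def inject_level3_bit_growth(content: str):
--     """Level 3: Silent bit-width growth without overflow protection.
--     Single linear pass building a fresh output list with a small state machine."""
--     MARKER = [
--         "  -- CHAOS-MONKEY: level3-bitgrowth",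
--         "  -- SUBTLETY: 3 (Subtle)",
--         "  -- VIOLATION: Arithmetic operation without overflow protection",
--         "  signal s_accumulator : unsigned(G_WIDTH - 1 downto 0); -- Will overflow!",
--     ]
--     BUG = [
--         "      -- SUBTLE BUG: Accumulator can overflow silently",
--         "      s_accumulator <= s_accumulator + 1;",
--     ]
--     out = []
--     state = 0          # 0: seeking signal decl, 1: seeking rising_edge, 2: done
--     sig_idx = None
--     for k, line in enumerate(content.split('\n')):
--         out.append(line)
--         if state == 0:
--             if 'signal' in line and 'downto 0' in line and 'WIDTH - 1' in line:
--                 out.extend(MARKER)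
--                 sig_idx = k
--                 state = 1
--         elif state == 1:
--             if 'if rising_edge' in line:
--                 out.extend(BUG)
--                 state = 2
--     if sig_idx is None:
--         return content, None
--     return '\n'.join(out), {
--         "id": "level3-bitgrowth",
--         "subtlety": 3,
--         "category": "Functional Errors",
--         "type": "Silent Overflow",
--         "severity": "subtle",
--         "line": sig_idx + 2,
--         "description": "Counter/accumulator will silently overflow without saturation",
--         "detection_difficulty": "subtle",
--         "expected_detection": {
--             "should_detect": True,
--             "detection_method": "arithmetic_bounds_checker",
--             "confidence": "medium",
--         },
--     }
-- ===== Notes on version B (the rewrite author's own statement) =====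
-- stated objective: simpler
-- what changed: Replaces A's find-index-then-splice (list.insert at computed indices plus a second index-range scan over the mutated list) with a single linear pass over the split lines that builds a fresh output list with a two-flag state machine, appending the marker and accumulation lines as they are reached.
import Mathlib
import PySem

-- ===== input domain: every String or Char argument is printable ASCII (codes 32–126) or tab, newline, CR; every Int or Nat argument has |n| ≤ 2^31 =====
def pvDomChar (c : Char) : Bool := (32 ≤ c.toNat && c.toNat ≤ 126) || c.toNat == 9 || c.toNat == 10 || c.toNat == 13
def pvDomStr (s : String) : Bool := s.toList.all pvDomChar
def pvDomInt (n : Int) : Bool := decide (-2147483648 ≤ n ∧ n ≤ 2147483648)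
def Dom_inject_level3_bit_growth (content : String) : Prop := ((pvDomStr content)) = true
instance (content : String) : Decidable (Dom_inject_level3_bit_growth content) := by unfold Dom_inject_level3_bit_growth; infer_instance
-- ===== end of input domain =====

-- B rewrites A's find-index-then-splice as one linear pass with a small state machine (objective: simpler).
-- The Python dict result (str/int/bool/nested-dict values) is rendered as a List (String × String) with each
-- value str()-ed, identically in both ports.

-- shared line tests ('x in line', as in both Pythons) and literal constants
def pvSigLine (l : String) : Bool :=
  PySem.Str.isIn "signal" l && PySem.Str.isIn "downto 0" l && PySem.Str.isIn "WIDTH - 1" l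

def pvEdgeLine (l : String) : Bool := PySem.Str.isIn "if rising_edge" l

def pvMarkerLines : List String :=
  [ "  -- CHAOS-MONKEY: level3-bitgrowth",
    "  -- SUBTLETY: 3 (Subtle)",
    "  -- VIOLATION: Arithmetic operation without overflow protection",
    "  signal s_accumulator : unsigned(G_WIDTH - 1 downto 0); -- Will overflow!" ]

def pvBug1 : String := "      -- SUBTLE BUG: Accumulator can overflow silently"
def pvBug2 : String := "      s_accumulator <= s_accumulator + 1;"

-- the metadata dict returned when the signal line is at index i (values str()-ed)
def pvMeta (i : Nat) : List (String × String) :=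
  [ ("id", "level3-bitgrowth"),
    ("subtlety", "3"),
    ("category", "Functional Errors"),
    ("type", "Silent Overflow"),
    ("severity", "subtle"),
    ("line", PySem.Int.toStr ((i : Int) + 2)),
    ("description", "Counter/accumulator will silently overflow without saturation"),
    ("detection_difficulty", "subtle"),
    ("expected_detection", "{'should_detect': True, 'detection_method': 'arithmetic_bounds_checker', 'confidence': 'medium'}") ]

-- ===== PORT A =====
-- 'for i, line in enumerate(lines): if <sig test>: return ...' — first matching index
def pvFindSig : List String → Nat → Option Nat
  | [], _ => none
  | l :: rest, i => if pvSigLine l then some i else pvFindSig rest (i + 1)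

-- 'for j in range(i+2, len(lines)): if <edge test in lines[j]>: break' — the scan of lines[i+2:],
-- transliterated as a walk over (lines.drop (i+2)) carrying the running index j (exact: same lines, same order)
def pvFindEdge : List String → Nat → Option Nat
  | [], _ => none
  | l :: rest, j => if pvEdgeLine l then some j else pvFindEdge rest (j + 1)

def inject_level3_bit_growth (content : String) : String × (Option (List (String × String))) :=
  let lines := (PySem.Str.split? content "\n").getD []
  match pvFindSig lines 0 with
  | none => (content, none)
  | some i =>
    let marker := PySem.Str.join "\n" pvMarkerLines          -- lines.insert(i+1, '\n'.join(marker))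
    let lines1 := PySem.List.insert lines ((i : Int) + 1) marker
    let lines2 :=
      match pvFindEdge (lines1.drop (i + 2)) (i + 2) with
      | none => lines1
      | some j =>
          PySem.List.insert (PySem.List.insert lines1 ((j : Int) + 1) pvBug1) ((j : Int) + 2) pvBug2
    (PySem.Str.join "\n" lines2, some (pvMeta i))

-- ===== PORT B =====
-- single pass: k = current original index, state 0/1/2, sig = saved signal index, out = output lines so far
def pvBLoop : List String → Nat → Nat → Option Nat → List String → List String × Option Nat
  | [], _, _, sig, out => (out, sig)
  | l :: rest, k, state, sig, out =>
    let out := out ++ [l]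
    if state == 0 then
      if pvSigLine l then pvBLoop rest (k + 1) 1 (some k) (out ++ pvMarkerLines)
      else pvBLoop rest (k + 1) 0 sig out
    else if state == 1 then
      if pvEdgeLine l then pvBLoop rest (k + 1) 2 sig (out ++ [pvBug1, pvBug2])
      else pvBLoop rest (k + 1) 1 sig out
    else pvBLoop rest (k + 1) state sig out

def inject_level3_bit_growth_alt (content : String) : String × (Option (List (String × String))) :=
  match pvBLoop ((PySem.Str.split? content "\n").getD []) 0 0 none [] with
  | (_, none) => (content, none)
  | (out, some i) => (PySem.Str.join "\n" out, some (pvMeta i))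

-- ===== PRECONDITION & SPEC =====
def Spec_inject_level3_bit_growth (content : String) (out : String × (Option (List (String × String)))) : Prop := out = inject_level3_bit_growth_alt content
instance (content : String) (out : String × (Option (List (String × String)))) : Decidable (Spec_inject_level3_bit_growth content out) := by unfold Spec_inject_level3_bit_growth; infer_instance

-- ===== CLAIM (what is proved, stated in full; the proofs are below) =====
def Claim_equal_inject_level3_bit_growth : Prop := ∀ (content : String), Dom_inject_level3_bit_growth content → Spec_inject_level3_bit_growth content (inject_level3_bit_growth content)

-- ===== LEMMAS AND PROOFS =====

-- proof-only helpers: what B's pass leaves behind once the signal (resp. edge) phase is entered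
def pvEdgeExpand : List String → List String
  | [] => []
  | l :: r => if pvEdgeLine l then l :: pvBug1 :: pvBug2 :: r else l :: pvEdgeExpand r

def pvSigExpand : List String → List String
  | [] => []
  | l :: r => if pvSigLine l then l :: (pvMarkerLines ++ pvEdgeExpand r) else l :: pvSigExpand r

theorem bloop_state2 (rest : List String) : ∀ (k : Nat) (sig : Option Nat) (out : List String),
    pvBLoop rest k 2 sig out = (out ++ rest, sig) := by
  induction rest with
  | nil => intro k sig out; simp [pvBLoop]
  | cons l r ih => intro k sig out; simp [pvBLoop, ih]

theorem bloop_state1 (rest : List String) : ∀ (k : Nat) (sig : Option Nat) (out : List String),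
    pvBLoop rest k 1 sig out = (out ++ pvEdgeExpand rest, sig) := by
  induction rest with
  | nil => intro k sig out; simp [pvBLoop, pvEdgeExpand]
  | cons l r ih =>
    intro k sig out
    by_cases h : pvEdgeLine l = true
    · simp [pvBLoop, pvEdgeExpand, h, bloop_state2]
    · simp [pvBLoop, pvEdgeExpand, h, ih]

theorem bloop_state0_none (rest : List String) : ∀ (k : Nat) (out : List String),
    pvFindSig rest k = none → pvBLoop rest k 0 none out = (out ++ rest, none) := by
  induction rest with
  | nil => intro k out _; simp [pvBLoop]
  | cons l r ih =>
    intro k out h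
    by_cases hs : pvSigLine l = true
    · simp [pvFindSig, hs] at h
    · simp [pvFindSig, hs] at h
      simp [pvBLoop, hs, ih _ _ h]

theorem bloop_state0_some (rest : List String) : ∀ (k i : Nat) (out : List String),
    pvFindSig rest k = some i → pvBLoop rest k 0 none out = (out ++ pvSigExpand rest, some i) := by
  induction rest with
  | nil => intro k i out h; simp [pvFindSig] at h
  | cons l r ih =>
    intro k i out h
    by_cases hs : pvSigLine l = true
    · simp [pvFindSig, hs] at h
      simp [pvBLoop, pvSigExpand, hs, bloop_state1, h]
    · simp [pvFindSig, hs] at h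
      simp [pvBLoop, pvSigExpand, hs, ih _ _ _ h]

theorem findSig_decomp (ls : List String) : ∀ (k i : Nat), pvFindSig ls k = some i →
    ∃ pre s tail, ls = pre ++ s :: tail ∧ i = k + pre.length ∧
      (∀ x ∈ pre, pvSigLine x = false) ∧ pvSigLine s = true := by
  induction ls with
  | nil => intro k i h; simp [pvFindSig] at h
  | cons l r ih =>
    intro k i h
    by_cases hs : pvSigLine l = true
    · simp [pvFindSig, hs] at h
      exact ⟨[], l, r, by simp, by simp; omega, by simp, hs⟩
    · simp [pvFindSig, hs] at h
      obtain ⟨pre, s, tail, he, hi, hp, hsg⟩ := ih _ _ h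
      refine ⟨l :: pre, s, tail, by simp [he], by simp; omega, ?_, hsg⟩
      intro x hx
      rw [List.mem_cons] at hx
      rcases hx with rfl | hx
      · simpa using hs
      · exact hp x hx

theorem findEdge_none (ls : List String) : ∀ (k : Nat), pvFindEdge ls k = none →
    ∀ x ∈ ls, pvEdgeLine x = false := by
  induction ls with
  | nil => intro k _ x hx; simp at hx
  | cons l r ih =>
    intro k h x hx
    by_cases he : pvEdgeLine l = true
    · simp [pvFindEdge, he] at h
    · simp [pvFindEdge, he] at h
      rw [List.mem_cons] at hx
      rcases hx with rfl | hx
      · simpa using he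
      · exact ih _ h x hx

theorem findEdge_decomp (ls : List String) : ∀ (k j : Nat), pvFindEdge ls k = some j →
    ∃ pre e tail, ls = pre ++ e :: tail ∧ j = k + pre.length ∧
      (∀ x ∈ pre, pvEdgeLine x = false) ∧ pvEdgeLine e = true := by
  induction ls with
  | nil => intro k j h; simp [pvFindEdge] at h
  | cons l r ih =>
    intro k j h
    by_cases he : pvEdgeLine l = true
    · simp [pvFindEdge, he] at h
      exact ⟨[], l, r, by simp, by simp; omega, by simp, he⟩
    · simp [pvFindEdge, he] at h
      obtain ⟨pre, e, tail, hee, hj, hp, heg⟩ := ih _ _ h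
      refine ⟨l :: pre, e, tail, by simp [hee], by simp; omega, ?_, heg⟩
      intro x hx
      rw [List.mem_cons] at hx
      rcases hx with rfl | hx
      · simpa using he
      · exact hp x hx

theorem edgeExpand_no_edge (ls : List String) (h : ∀ x ∈ ls, pvEdgeLine x = false) :
    pvEdgeExpand ls = ls := by
  induction ls with
  | nil => rfl
  | cons l r ih =>
    have hl : pvEdgeLine l = false := h l (by simp)
    simp [pvEdgeExpand, hl]
    exact ih (fun x hx => h x (by simp [hx]))

theorem edgeExpand_decomp (pre : List String) (e : String) (tail : List String)
    (hp : ∀ x ∈ pre, pvEdgeLine x = false) (he : pvEdgeLine e = true) :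
    pvEdgeExpand (pre ++ e :: tail) = pre ++ e :: pvBug1 :: pvBug2 :: tail := by
  induction pre with
  | nil => simp [pvEdgeExpand, he]
  | cons l r ih =>
    have hl : pvEdgeLine l = false := hp l (by simp)
    simp [pvEdgeExpand, hl]
    exact ih (fun x hx => hp x (by simp [hx]))

theorem sigExpand_decomp (pre : List String) (s : String) (tail : List String)
    (hp : ∀ x ∈ pre, pvSigLine x = false) (hs : pvSigLine s = true) :
    pvSigExpand (pre ++ s :: tail) = pre ++ s :: (pvMarkerLines ++ pvEdgeExpand tail) := by
  induction pre with
  | nil => simp [pvSigExpand, hs]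
  | cons l r ih =>
    have hl : pvSigLine l = false := hp l (by simp)
    simp [pvSigExpand, hl]
    exact ih (fun x hx => hp x (by simp [hx]))

theorem insert_at_len (a b : List String) (v : String) :
    PySem.List.insert (a ++ b) ((a.length : Int)) v = a ++ v :: b := by
  rw [PySem.List.insert_natCast (a ++ b) a.length v (by simp)]
  simp

-- join over List Char: join of a concatenation, and flattening a pre-joined element
theorem join_append_ne (sep : List Char) (a b : List (List Char)) (ha : a ≠ []) (hb : b ≠ []) :
    PySem.Chars.join sep (a ++ b) = PySem.Chars.join sep a ++ sep ++ PySem.Chars.join sep b := by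
  induction a with
  | nil => exact absurd rfl ha
  | cons x r ih =>
    cases r with
    | nil =>
      cases b with
      | nil => exact absurd rfl hb
      | cons z b' => simp [PySem.Chars.join_cons_cons, PySem.Chars.join_singleton]
    | cons y t =>
      have hih := ih (by simp)
      simp only [List.cons_append] at hih ⊢
      rw [PySem.Chars.join_cons_cons, PySem.Chars.join_cons_cons, hih]
      simp

theorem join_glue (sep : List Char) (a : List (List Char)) (xs : List (List Char))
    (r : List (List Char)) (hxs : xs ≠ []) :
    PySem.Chars.join sep (a ++ PySem.Chars.join sep xs :: r) =
      PySem.Chars.join sep (a ++ (xs ++ r)) := by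
  have L : ∀ (xs : List (List Char)), xs ≠ [] → ∀ (r : List (List Char)),
      PySem.Chars.join sep (PySem.Chars.join sep xs :: r) = PySem.Chars.join sep (xs ++ r) := by
    intro xs hxs
    induction xs with
    | nil => exact absurd rfl hxs
    | cons x t ih =>
      intro r
      cases t with
      | nil => simp [PySem.Chars.join_singleton]
      | cons y t' =>
        cases r with
        | nil => simp [PySem.Chars.join_singleton]
        | cons z r' =>
          have hih := ih (by simp) (z :: r')
          rw [PySem.Chars.join_cons_cons] at hih
          simp only [List.cons_append] at hih ⊢
          rw [PySem.Chars.join_cons_cons, PySem.Chars.join_cons_cons sep x y t',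
            PySem.Chars.join_cons_cons, ← hih]
          simp
  cases a with
  | nil => simpa using L xs hxs r
  | cons w a' =>
    rw [join_append_ne sep _ _ (by simp) (by simp), L xs hxs r, ← join_append_ne sep _ _ (by simp)]
    · rcases xs with _ | ⟨x, xs'⟩
      · exact absurd rfl hxs
      · simp
    
theorem str_join_glue (a : List String) (xs : List String) (r : List String) (hxs : xs ≠ []) :
    PySem.Str.join "\n" (a ++ PySem.Str.join "\n" xs :: r) =
      PySem.Str.join "\n" (a ++ (xs ++ r)) := by
  apply String.ext
  rw [PySem.Str.toList_join, PySem.Str.toList_join]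
  simp only [List.map_append, List.map_cons, PySem.Str.toList_join]
  exact join_glue _ _ _ _ (by simpa using hxs)

-- ===== VERDICT =====
theorem inject_level3_bit_growth_spec : Claim_equal_inject_level3_bit_growth := by
  intro content _
  show inject_level3_bit_growth content = inject_level3_bit_growth_alt content
  unfold inject_level3_bit_growth inject_level3_bit_growth_alt
  generalize (PySem.Str.split? content "\n").getD [] = lines
  dsimp only
  cases h : pvFindSig lines 0 with
  | none =>
    rw [bloop_state0_none lines 0 [] h]
  | some i =>
    rw [bloop_state0_some lines 0 i [] h]
    obtain ⟨pre, s, tail, he, hi, hp, hs⟩ := findSig_decomp lines 0 i h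
    have hi' : i = pre.length := by omega
    subst hi'
    subst he
    rw [sigExpand_decomp pre s tail hp hs]
    -- A's first insert
    have h1 : PySem.List.insert (pre ++ s :: tail) ((pre.length : Int) + 1) (PySem.Str.join "\n" pvMarkerLines)
        = pre ++ s :: PySem.Str.join "\n" pvMarkerLines :: tail := by
      have hc : ((pre.length : Int) + 1) = (((pre ++ [s]).length : Nat) : Int) := by simp
      rw [hc, show pre ++ s :: tail = (pre ++ [s]) ++ tail by simp, insert_at_len]
      simp
    dsimp only
    rw [h1]
    have hdrop : (pre ++ s :: PySem.Str.join "\n" pvMarkerLines :: tail).drop (pre.length + 2)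
        = tail := by
      rw [show pre ++ s :: PySem.Str.join "\n" pvMarkerLines :: tail
            = (pre ++ [s, PySem.Str.join "\n" pvMarkerLines]) ++ tail by simp,
        show pre.length + 2 = (pre ++ [s, PySem.Str.join "\n" pvMarkerLines]).length by simp]
      exact List.drop_left
    rw [hdrop]
    cases hedge : pvFindEdge tail (pre.length + 2) with
    | none =>
      rw [edgeExpand_no_edge tail (findEdge_none tail _ hedge)]
      refine Prod.ext ?_ rfl
      show PySem.Str.join "\n" (pre ++ s :: PySem.Str.join "\n" pvMarkerLines :: tail)
        = PySem.Str.join "\n" (pre ++ s :: (pvMarkerLines ++ tail))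
      rw [show pre ++ s :: PySem.Str.join "\n" pvMarkerLines :: tail
            = (pre ++ [s]) ++ PySem.Str.join "\n" pvMarkerLines :: tail by simp,
        str_join_glue _ _ _ (by simp [pvMarkerLines])]
      simp
    | some j =>
      obtain ⟨pre2, e, tail2, he2, hj, hp2, hed⟩ := findEdge_decomp tail _ _ hedge
      subst he2
      dsimp only
      rw [edgeExpand_decomp pre2 e tail2 hp2 hed]
      -- A's two bug inserts
      have h2 : PySem.List.insert
          (pre ++ s :: PySem.Str.join "\n" pvMarkerLines :: (pre2 ++ e :: tail2))
          ((j : Int) + 1) pvBug1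
          = (pre ++ s :: PySem.Str.join "\n" pvMarkerLines :: pre2 ++ [e]) ++ pvBug1 :: tail2 := by
        have hlen : ((j : Int) + 1)
            = (((pre ++ s :: PySem.Str.join "\n" pvMarkerLines :: pre2 ++ [e]).length : Nat) : Int) := by
          subst hj; push_cast; simp; ring
        rw [hlen,
          show pre ++ s :: PySem.Str.join "\n" pvMarkerLines :: (pre2 ++ e :: tail2)
            = (pre ++ s :: PySem.Str.join "\n" pvMarkerLines :: pre2 ++ [e]) ++ tail2 by simp,
          insert_at_len]
      have h3 : PySem.List.insert
          ((pre ++ s :: PySem.Str.join "\n" pvMarkerLines :: pre2 ++ [e]) ++ pvBug1 :: tail2)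
          ((j : Int) + 2) pvBug2
          = pre ++ s :: PySem.Str.join "\n" pvMarkerLines :: (pre2 ++ e :: pvBug1 :: pvBug2 :: tail2) := by
        have hlen : ((j : Int) + 2)
            = ((((pre ++ s :: PySem.Str.join "\n" pvMarkerLines :: pre2 ++ [e]) ++ [pvBug1]).length : Nat) : Int) := by
          subst hj; push_cast; simp; ring
        rw [hlen,
          show (pre ++ s :: PySem.Str.join "\n" pvMarkerLines :: pre2 ++ [e]) ++ pvBug1 :: tail2
            = ((pre ++ s :: PySem.Str.join "\n" pvMarkerLines :: pre2 ++ [e]) ++ [pvBug1]) ++ tail2 by simp,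
          insert_at_len]
        simp
      rw [h2, h3]
      refine Prod.ext ?_ rfl
      show PySem.Str.join "\n" (pre ++ s :: PySem.Str.join "\n" pvMarkerLines :: (pre2 ++ e :: pvBug1 :: pvBug2 :: tail2))
        = PySem.Str.join "\n" (pre ++ s :: (pvMarkerLines ++ (pre2 ++ e :: pvBug1 :: pvBug2 :: tail2)))
      rw [show pre ++ s :: PySem.Str.join "\n" pvMarkerLines :: (pre2 ++ e :: pvBug1 :: pvBug2 :: tail2)
            = (pre ++ [s]) ++ PySem.Str.join "\n" pvMarkerLines :: (pre2 ++ e :: pvBug1 :: pvBug2 :: tail2) by simp,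
        str_join_glue _ _ _ (by simp [pvMarkerLines])]
      simp
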